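-- pv_equiv track=rewrite | github.com/EduardoSRTolentino/TTV-Sistema-Torneios | backend/app/services/bracket.py | compute_first_round_slots
-- ===== SOURCE A (Python) =====
-- from typing import List, Optional
--
-- def _next_power_of_2(n: int) -> int:
--     if n <= 1:
--         return 1
--     p = 1
--     while p < n:
--         p <<= 1
--     return p
--
-- def standard_bracket_seed_line(n: int) -> list[int]:
--     """
--     Linha do bracket (folhas) com seeds 1..n, n potência de 2.
--     Expansão padrão: garante 1º e 2º só na final, 1º e 3º só na semi, etc.
--     Ex.: n=8 → [1, 8, 4, 5, 2, 7, 3, 6] (pares consecutivos = confrontos).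
--     """
--     if n < 1:
--         return []
--     if n == 1:
--         return [1]
--     r = 1
--     seeds = [1]
--     while len(seeds) < n:
--         nxt: list[int] = []
--         for s in seeds:
--             nxt.append(s)
--             nxt.append(2**r + 1 - s)
--         seeds = nxt
--         r += 1
--     return seeds
--
-- def competitive_bracket_seed_line(n: int) -> list[int]:
--     """
--     Ordem das folhas alinhada ao padrão desejado (ex. 8 jogadores):
--     [1, 8, 4, 5, 3, 6, 2, 7] — mesmos confrontos que o padrão, metade direita reordenada em blocos de 4.
--     """
--     seeds = standard_bracket_seed_line(n)
--     if n <= 4: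
--         return seeds
--     h = n // 2
--     left = seeds[:h]
--     right = seeds[h:]
--     new_right: list[int] = []
--     i = 0
--     while i < len(right):
--         if i + 4 <= len(right):
--             chunk = right[i : i + 4]
--             new_right.extend([chunk[2], chunk[3], chunk[0], chunk[1]])
--             i += 4
--         else:
--             new_right.extend(right[i:])
--             break
--     return left + new_right
--
-- def compute_first_round_slots(n: int, ordered_registration_ids: list[int]) -> list[Optional[int]]:
--     """
--     n participantes; IDs na ordem seed 1..n (melhor → pior).
--     Folhas do bracket em ordem competitiva; seeds ausentes viram BYE no slot do oponente.
--     """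
--     if len(ordered_registration_ids) != n:
--         raise ValueError("Lista de inscrições não bate com n.")
--     S = _next_power_of_2(n)
--     line = competitive_bracket_seed_line(S)
--
--     def reg_id_for_seed(seed_num: int) -> Optional[int]:
--         if 1 <= seed_num <= n:
--             return ordered_registration_ids[seed_num - 1]
--         return None
--
--     slots: list[Optional[int]] = []
--     for s in line:
--         slots.append(reg_id_for_seed(s))
--
--     seen: set[int] = set()
--     for x in slots:
--         if x is not None:
--             if x in seen:
--                 raise ValueError("Inscrição duplicada no chaveamento.")
--             seen.add(x)
--     return slots
-- ===== SOURCE B (Python) =====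
-- from typing import List, Optional
--
-- def compute_first_round_slots(n: int, ordered_registration_ids: list[int]) -> list[Optional[int]]:
--     if len(ordered_registration_ids) != n:
--         raise ValueError("Lista de inscrições não bate com n.")
--
--     def size(m: int) -> int:
--         # smallest power of 2 >= m, by divide and conquer
--         return 1 if m <= 1 else 2 * size((m + 1) // 2)
--
--     def line(m: int) -> list[int]:
--         # standard seed line by divide and conquer: line(2k) replaces each
--         # seed s of line(k) by the pair (s, 2k+1-s)
--         if m == 1:
--             return [1]
--         return [t for s in line(m // 2) for t in (s, m + 1 - s)]
--
--     S = size(n)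
--     seeds = line(S)
--     if S > 4:
--         h = S // 2
--         left, right = seeds[:h], seeds[h:]
--         seeds = left + [right[i + d] for i in range(0, h, 4) for d in (2, 3, 0, 1)]
--
--     slots = [ordered_registration_ids[s - 1] if 1 <= s <= n else None for s in seeds]
--
--     seen: set[int] = set()
--     for x in slots:
--         if x is not None:
--             if x in seen:
--                 raise ValueError("Inscrição duplicada no chaveamento.")
--             seen.add(x)
--     return slots
-- ===== Notes on version B (the rewrite author's own statement) =====
-- stated objective: alternative
-- what changed: A's two iterative doubling loops (next-power-of-2 accumulation and level-by-level seed-line expansion) are replaced by divide-and-conquer recursions on the bracket size: size(m)=2*size(ceil(m/2)) and line(2m) built by expanding each seed of line(m) into a consecutive pair; the competitive 4-block reorder becomes a single index comprehension and the slot mapping a comprehension.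
import Mathlib
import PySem

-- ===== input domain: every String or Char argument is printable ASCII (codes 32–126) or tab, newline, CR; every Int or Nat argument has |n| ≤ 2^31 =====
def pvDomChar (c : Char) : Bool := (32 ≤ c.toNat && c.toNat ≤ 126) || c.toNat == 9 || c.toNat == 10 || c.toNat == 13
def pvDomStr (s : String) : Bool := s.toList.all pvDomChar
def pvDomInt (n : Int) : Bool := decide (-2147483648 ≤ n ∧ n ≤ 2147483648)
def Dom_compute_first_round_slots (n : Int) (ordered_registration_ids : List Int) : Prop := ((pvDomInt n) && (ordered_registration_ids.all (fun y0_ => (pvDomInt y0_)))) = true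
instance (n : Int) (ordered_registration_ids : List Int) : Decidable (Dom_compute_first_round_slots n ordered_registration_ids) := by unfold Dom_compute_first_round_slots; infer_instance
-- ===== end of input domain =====

-- B replaces A's two iterative doubling loops (next power of two; level-by-level seed-line
-- expansion) by divide-and-conquer recursions on the bracket size; same reorder and mapping.

-- ===== PORT A =====
-- while p < n: p <<= 1   (the '1 ≤ p' test only makes the recursion total; p ≥ 1 at every real call)
def pvNextPow2Loop (p n : Int) : Int :=
  if p < n then
    (if _h : 1 ≤ p then pvNextPow2Loop (p * 2) n else p)
  else p
termination_by (n - p).toNat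
decreasing_by omega

def pv_next_power_of_2 (n : Int) : Int :=
  if n ≤ 1 then 1 else pvNextPow2Loop 1 n

-- length of the doubled level (used only for termination of pvStdLoop)
theorem pv_flat_pair_length {α β : Type} (l : List α) (f g : α → β) :
    (l.flatMap (fun s => [f s, g s])).length = 2 * l.length := by
  induction l with
  | nil => rfl
  | cons a t ih => simp [List.flatMap_cons, ih]; omega

-- while len(seeds) < n: seeds = [s, 2**r + 1 - s for s in seeds]; r += 1
-- (the 'seeds ≠ []' test only makes the recursion total; seeds is never empty at a real call)
def pvStdLoop (r : Nat) (seeds : List Int) (n : Int) : List Int :=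
  if (seeds.length : Int) < n then
    (if _h : seeds ≠ [] then
      pvStdLoop (r + 1) (seeds.flatMap (fun s => [s, 2 ^ r + 1 - s])) n
     else seeds)
  else seeds
termination_by (n - seeds.length).toNat
decreasing_by
  rw [pv_flat_pair_length]
  simp only [List.length_attach]
  have : seeds.length ≠ 0 := fun h => _h (List.eq_nil_of_length_eq_zero h)
  omega

def standard_bracket_seed_line (n : Int) : List Int :=
  if n < 1 then []
  else if n = 1 then [1]
  else pvStdLoop 1 [1] n

-- while i < len(right): full 4-chunks are swapped pairwise; a short tail is copied
def pvReorderLoop (right : List Int) : List Int :=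
  match right with
  | a :: b :: c :: d :: rest => c :: d :: a :: b :: pvReorderLoop rest
  | rest => rest

def competitive_bracket_seed_line (n : Int) : List Int :=
  let seeds := standard_bracket_seed_line n
  if n ≤ 4 then seeds
  else
    let h := PySem.Int.floordiv n 2
    PySem.List.slice seeds none (some h) ++ pvReorderLoop (PySem.List.slice seeds (some h) none)

-- the duplicate scan of both Pythons: true iff some non-None id repeats (Python raises there; Pre_ excludes it)
def pvDupFound (slots : List (Option Int)) : Bool :=
  (slots.foldl
    (fun (st : PySem.Set Int × Bool) x =>
      match x with
      | none => st
      | some v => if PySem.Set.contains st.1 v then (st.1, true) else (PySem.Set.add st.1 v, st.2))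
    (PySem.Set.empty, false)).2

def compute_first_round_slots (n : Int) (ordered_registration_ids : List Int) : List (Option Int) :=
  if (ordered_registration_ids.length : Int) ≠ n then []   -- ValueError (excluded by Pre_)
  else
    let S := pv_next_power_of_2 n
    let line := competitive_bracket_seed_line S
    let slots := line.map (fun s =>
      if 1 ≤ s ∧ s ≤ n then some (PySem.List.pyGetD ordered_registration_ids (s - 1) 0) else none)
    if pvDupFound slots then [] else slots   -- ValueError (excluded by Pre_)

-- ===== PORT B =====
-- size(m) = 1 if m <= 1 else 2 * size((m + 1) // 2)
def pvBSize (m : Int) : Int :=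
  if m ≤ 1 then 1 else 2 * pvBSize (PySem.Int.floordiv (m + 1) 2)
termination_by m.toNat
decreasing_by
  rw [PySem.Int.floordiv_eq_ediv_of_pos (by omega)]
  omega

-- line(m) = [1] if m == 1 else [t for s in line(m // 2) for t in (s, m + 1 - s)]
-- ('m ≤ 1' instead of 'm == 1' only makes the recursion total; m is always a power of two ≥ 1 here)
def pvBLine (m : Int) : List Int :=
  if m ≤ 1 then [1]
  else (pvBLine (PySem.Int.floordiv m 2)).flatMap (fun s => [s, m + 1 - s])
termination_by m.toNat
decreasing_by
  rw [PySem.Int.floordiv_eq_ediv_of_pos (by omega)]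
  omega

def compute_first_round_slots_alt (n : Int) (ordered_registration_ids : List Int) : List (Option Int) :=
  if (ordered_registration_ids.length : Int) ≠ n then []   -- ValueError (excluded by Pre_)
  else
    let S := pvBSize n
    let line0 := pvBLine S
    let line :=
      if 4 < S then
        let h := PySem.Int.floordiv S 2
        let right := PySem.List.slice line0 (some h) none
        PySem.List.slice line0 none (some h) ++
          (PySem.List.pyRange 0 h 4).flatMap
            (fun i => [(2 : Int), 3, 0, 1].map (fun d => PySem.List.pyGetD right (i + d) 0))
      else line0
    let slots := line.map (fun s =>
      if 1 ≤ s ∧ s ≤ n then some (PySem.List.pyGetD ordered_registration_ids (s - 1) 0) else none)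
    if pvDupFound slots then [] else slots   -- ValueError (excluded by Pre_)

-- ===== PRECONDITION & SPEC =====
-- Pre_ excludes exactly the inputs where A raises ValueError: a list whose length differs from n,
-- and a list with a duplicated registration id.
def Pre_compute_first_round_slots (n : Int) (ordered_registration_ids : List Int) : Prop :=
  (ordered_registration_ids.length : Int) = n ∧ ordered_registration_ids.Nodup
instance (n : Int) (ordered_registration_ids : List Int) : Decidable (Pre_compute_first_round_slots n ordered_registration_ids) := by unfold Pre_compute_first_round_slots; infer_instance

def pvWitness_compute_first_round_slots : Int × List Int := (2, [10, 20])

def Spec_compute_first_round_slots (n : Int) (ordered_registration_ids : List Int) (out : List (Option Int)) : Prop := out = compute_first_round_slots_alt n ordered_registration_ids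
instance (n : Int) (ordered_registration_ids : List Int) (out : List (Option Int)) : Decidable (Spec_compute_first_round_slots n ordered_registration_ids out) := by unfold Spec_compute_first_round_slots; infer_instance

-- ===== CLAIM (what is proved, stated in full; the proofs are below) =====
def Claim_equal_compute_first_round_slots : Prop := ∀ (n : Int) (ordered_registration_ids : List Int), Dom_compute_first_round_slots n ordered_registration_ids → Pre_compute_first_round_slots n ordered_registration_ids → Spec_compute_first_round_slots n ordered_registration_ids (compute_first_round_slots n ordered_registration_ids)

-- ===== LEMMAS AND PROOFS =====

-- the seed line after r doublings (level r of either construction)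
def pvIt : Nat → List Int
  | 0 => [1]
  | r + 1 => (pvIt r).flatMap (fun s => [s, 2 ^ (r + 1) + 1 - s])

theorem pvIt_length (r : Nat) : (pvIt r).length = 2 ^ r := by
  induction r with
  | zero => rfl
  | succ r ih => simp only [pvIt, pv_flat_pair_length, ih]; ring

theorem pvIt_ne_nil (r : Nat) : pvIt r ≠ [] := by
  intro h
  have h2 := pvIt_length r
  rw [h] at h2
  have hp : 0 < 2 ^ r := Nat.two_pow_pos r
  simp at h2
  omega

theorem pv_fd2 (k : Nat) : PySem.Int.floordiv ((2 : Int) ^ (k + 1)) 2 = 2 ^ k := by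
  rw [PySem.Int.floordiv_eq_ediv_of_pos (by norm_num), pow_succ]
  exact Int.mul_ediv_cancel _ (by norm_num)

theorem pv_two_le_pow (k : Nat) : (2 : Int) ≤ 2 ^ (k + 1) := by
  calc (2 : Int) = 2 ^ 1 := by norm_num
  _ ≤ 2 ^ (k + 1) := by apply pow_le_pow_right₀ <;> omega

theorem pvBLine_eq_it (k : Nat) : pvBLine ((2 : Int) ^ k) = pvIt k := by
  induction k with
  | zero => simp [pvBLine, pvIt]
  | succ k ih =>
    rw [pvBLine]
    rw [if_neg (by have := pv_two_le_pow k; omega), pv_fd2, ih]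
    rfl

theorem pvStdLoop_run (d : Nat) : ∀ (r : Nat), pvStdLoop (r + 1) (pvIt r) ((2 : Int) ^ (r + d)) = pvIt (r + d) := by
  induction d with
  | zero =>
    intro r
    simp only [Nat.add_zero]
    rw [pvStdLoop.eq_def, if_neg (by rw [pvIt_length]; push_cast; omega)]
  | succ d ih =>
    intro r
    have hlt : ((pvIt r).length : Int) < 2 ^ (r + (d + 1)) := by
      rw [pvIt_length]
      push_cast
      have : (2 : Int) ^ r < 2 ^ (r + (d + 1)) := by
        apply pow_lt_pow_right₀ (by norm_num)
        omega
      omega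
    rw [pvStdLoop.eq_def, if_pos hlt, dif_pos (pvIt_ne_nil r)]
    have hstep : (pvIt r).flatMap (fun s => [s, 2 ^ (r + 1) + 1 - s]) = pvIt (r + 1) := rfl
    rw [hstep]
    have := ih (r + 1)
    rw [show r + 1 + d = r + (d + 1) by omega] at this
    exact this

theorem pvStd_eq_it (k : Nat) : standard_bracket_seed_line ((2 : Int) ^ k) = pvIt k := by
  cases k with
  | zero => rfl
  | succ k =>
    rw [standard_bracket_seed_line]
    have h2 : (2 : Int) ≤ 2 ^ (k + 1) := pv_two_le_pow k
    rw [if_neg (by omega), if_neg (by omega)]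
    have := pvStdLoop_run (k + 1) 0
    simpa using this

theorem pvLoopDbl (K : Nat) : ∀ (p n : Int), (n - p).toNat ≤ K → 1 ≤ p →
    pvNextPow2Loop (2 * p) n = 2 * pvNextPow2Loop p (PySem.Int.floordiv (n + 1) 2) := by
  induction K with
  | zero =>
    intro p n hK hp
    have hc : PySem.Int.floordiv (n + 1) 2 = (n + 1) / 2 := PySem.Int.floordiv_eq_ediv_of_pos (by norm_num)
    rw [pvNextPow2Loop.eq_def, if_neg (by omega)]
    conv_rhs => rw [pvNextPow2Loop.eq_def]
    rw [if_neg (by rw [hc]; omega)]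
  | succ K ih =>
    intro p n hK hp
    have hc : PySem.Int.floordiv (n + 1) 2 = (n + 1) / 2 := PySem.Int.floordiv_eq_ediv_of_pos (by norm_num)
    by_cases h : 2 * p < n
    · rw [pvNextPow2Loop.eq_def, if_pos h, dif_pos (by omega)]
      rw [show 2 * p * 2 = 2 * (2 * p) by ring]
      rw [ih (2 * p) n (by omega) (by omega)]
      congr 1
      have hpc : p < PySem.Int.floordiv (n + 1) 2 := by rw [hc]; omega
      conv_rhs => rw [pvNextPow2Loop.eq_def]
      rw [if_pos hpc, dif_pos hp]
      rw [show p * 2 = 2 * p from by ring]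
    · rw [pvNextPow2Loop.eq_def, if_neg h]
      conv_rhs => rw [pvNextPow2Loop.eq_def]
      rw [if_neg (by rw [hc]; omega)]

theorem pvNp2_eq_bsize_aux (K : Nat) : ∀ (n : Int), n.toNat ≤ K → pv_next_power_of_2 n = pvBSize n := by
  induction K with
  | zero =>
    intro n hK
    rw [pv_next_power_of_2, pvBSize, if_pos (by omega), if_pos (by omega)]
  | succ K ih =>
    intro n hK
    by_cases h1 : n ≤ 1
    · rw [pv_next_power_of_2, pvBSize, if_pos h1, if_pos h1]
    · have hc : PySem.Int.floordiv (n + 1) 2 = (n + 1) / 2 := PySem.Int.floordiv_eq_ediv_of_pos (by norm_num)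
      rw [pv_next_power_of_2, if_neg h1]
      rw [pvNextPow2Loop.eq_def, if_pos (by omega), dif_pos (by norm_num)]
      rw [show (1 : Int) * 2 = 2 * 1 by ring]
      rw [pvLoopDbl ((n - 1).toNat) 1 n (by omega) (by norm_num)]
      rw [pvBSize, if_neg h1]
      congr 1
      rw [← ih (PySem.Int.floordiv (n + 1) 2) (by rw [hc]; omega)]
      rw [pv_next_power_of_2]
      by_cases h2 : PySem.Int.floordiv (n + 1) 2 ≤ 1
      · rw [if_pos h2, pvNextPow2Loop.eq_def, if_neg (by omega)]
      · rw [if_neg h2]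

theorem pvNp2_eq_bsize (n : Int) : pv_next_power_of_2 n = pvBSize n :=
  pvNp2_eq_bsize_aux n.toNat n le_rfl

theorem pvBSize_pow_aux (K : Nat) : ∀ (m : Int), m.toNat ≤ K → ∃ k : Nat, pvBSize m = (2 : Int) ^ k := by
  induction K with
  | zero => intro m hK; exact ⟨0, by rw [pvBSize, if_pos (by omega)]; norm_num⟩
  | succ K ih =>
    intro m hK
    by_cases h1 : m ≤ 1
    · exact ⟨0, by rw [pvBSize, if_pos h1]; norm_num⟩
    · have hc : PySem.Int.floordiv (m + 1) 2 = (m + 1) / 2 := PySem.Int.floordiv_eq_ediv_of_pos (by norm_num)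
      obtain ⟨k, hk⟩ := ih (PySem.Int.floordiv (m + 1) 2) (by rw [hc]; omega)
      exact ⟨k + 1, by rw [pvBSize, if_neg h1, hk, pow_succ]; ring⟩

theorem pvBSize_pow (n : Int) : ∃ k : Nat, pvBSize n = (2 : Int) ^ k :=
  pvBSize_pow_aux n.toNat n le_rfl

-- pyGetD four positions further down a list skips one 4-chunk
theorem pv_getD_step (w : Int) (xs : List Int) (i : Int) (hi : 0 ≤ i) :
    PySem.List.pyGetD (w :: xs) (i + 1) 0 = PySem.List.pyGetD xs i 0 := by
  obtain ⟨j, rfl⟩ : ∃ j : Nat, i = (j : Int) := ⟨i.toNat, (Int.toNat_of_nonneg hi).symm⟩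
  rw [show ((j : Int) + 1) = ((j + 1 : Nat) : Int) from by push_cast; ring,
    PySem.List.pyGetD_natCast, PySem.List.pyGetD_natCast]
  simp

-- A's chunk-swap loop equals B's index comprehension on a right half of length 4*m
theorem pvReorder_eq (m : Nat) : ∀ (right : List Int), right.length = 4 * m →
    pvReorderLoop right =
      (PySem.List.pyRange 0 ((4 * m : Nat) : Int) 4).flatMap
        (fun i => [(2 : Int), 3, 0, 1].map (fun d => PySem.List.pyGetD right (i + d) 0)) := by
  induction m with
  | zero =>
    intro right h
    have : right = [] := List.eq_nil_of_length_eq_zero h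
    subst this
    rfl
  | succ m ih =>
    intro right h
    match right, h with
    | a :: b :: c :: d :: rest, h =>
      have hrest : rest.length = 4 * m := by simp at h; omega
      have hA : pvReorderLoop (a :: b :: c :: d :: rest) = c :: d :: a :: b :: pvReorderLoop rest := rfl
      rw [hA, PySem.List.pyRange_of_pos _ _ (by norm_num), List.flatMap_map]
      have hcount : (if (0 : Int) < ((4 * (m + 1) : Nat) : Int) then ((((4 * (m + 1) : Nat) : Int) - 0 + 4 - 1) / 4).toNat else 0) = m + 1 := by
        rw [if_pos (by push_cast; omega)]
        push_cast
        omega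
      rw [hcount, List.range_succ_eq_map, List.flatMap_cons, List.flatMap_map]
      have hhead : [(2 : Int), 3, 0, 1].map (fun d' => PySem.List.pyGetD (a :: b :: c :: d :: rest) (0 + 4 * ((0 : Nat) : Int) + d') 0) = [c, d, a, b] := by
        norm_num [pysem]
      have hx : ∀ (kk : Nat) (e : Int), 0 ≤ e →
          PySem.List.pyGetD (a :: b :: c :: d :: rest) (0 + 4 * ((kk.succ : Nat) : Int) + e) 0 =
            PySem.List.pyGetD rest (0 + 4 * ((kk : Nat) : Int) + e) 0 := by
        intro kk e he
        have hnn : (0 : Int) ≤ 0 + 4 * ((kk : Nat) : Int) + e := by positivity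
        rw [show (0 + 4 * ((kk.succ : Nat) : Int) + e) = (0 + 4 * ((kk : Nat) : Int) + e) + 1 + 1 + 1 + 1 from by push_cast; ring]
        rw [pv_getD_step a _ _ (by omega), pv_getD_step b _ _ (by omega),
          pv_getD_step c _ _ (by omega), pv_getD_step d _ _ (by omega)]
      have htail : (List.range m).flatMap
          (fun kk => [(2 : Int), 3, 0, 1].map (fun d' => PySem.List.pyGetD (a :: b :: c :: d :: rest) (0 + 4 * ((kk.succ : Nat) : Int) + d') 0)) =
          (List.range m).flatMap
          (fun kk => [(2 : Int), 3, 0, 1].map (fun d' => PySem.List.pyGetD rest (0 + 4 * ((kk : Nat) : Int) + d') 0)) := by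
        congr 1
        funext kk
        simp only [List.map_cons, List.map_nil]
        rw [hx kk 2 (by norm_num), hx kk 3 (by norm_num), hx kk 0 (by norm_num), hx kk 1 (by norm_num)]
      rw [hhead, htail]
      have hrec := ih rest hrest
      rw [PySem.List.pyRange_of_pos _ _ (by norm_num), List.flatMap_map] at hrec
      have hcount2 : (if (0 : Int) < ((4 * m : Nat) : Int) then ((((4 * m : Nat) : Int) - 0 + 4 - 1) / 4).toNat else 0) = m := by
        by_cases hm : 0 < m
        · rw [if_pos (by push_cast; omega)]; push_cast; omega
        · rw [if_neg (by push_cast; omega)]; omega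
      rw [hcount2] at hrec
      rw [← hrec]
      rfl
    | [], h => simp at h
    | [_], h => simp at h; omega
    | [_, _], h => simp at h; omega
    | [_, _, _], h => simp at h; omega

-- the line A computes equals the line B computes, for every n
theorem pvLine_eq (n : Int) :
    competitive_bracket_seed_line (pv_next_power_of_2 n) =
      (if 4 < pvBSize n then
        PySem.List.slice (pvBLine (pvBSize n)) none (some (PySem.Int.floordiv (pvBSize n) 2)) ++
          (PySem.List.pyRange 0 (PySem.Int.floordiv (pvBSize n) 2) 4).flatMap
            (fun i => [(2 : Int), 3, 0, 1].map (fun d =>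
              PySem.List.pyGetD (PySem.List.slice (pvBLine (pvBSize n)) (some (PySem.Int.floordiv (pvBSize n) 2)) none) (i + d) 0))
      else pvBLine (pvBSize n)) := by
  obtain ⟨k, hk⟩ := pvBSize_pow n
  rw [pvNp2_eq_bsize, hk, pvBLine_eq_it]
  unfold competitive_bracket_seed_line
  rw [pvStd_eq_it]
  by_cases hks : k ≤ 2
  · have h4 : ((2 : Int) ^ k ≤ 4) := by interval_cases k <;> norm_num
    rw [if_pos h4, if_neg (by omega)]
  · have h4 : (4 : Int) < 2 ^ k := by
      calc (4 : Int) = 2 ^ 2 := by norm_num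
      _ < 2 ^ k := by apply pow_lt_pow_right₀ (by norm_num); omega
    rw [if_neg (by omega), if_pos h4]
    simp only []
    have hfd : PySem.Int.floordiv ((2 : Int) ^ k) 2 = 2 ^ (k - 1) := by
      have := pv_fd2 (k - 1)
      rw [show k - 1 + 1 = k from by omega] at this
      exact this
    have hcast : ((2 : Int) ^ (k - 1)) = ((4 * 2 ^ (k - 3) : Nat) : Int) := by
      push_cast
      rw [show k - 1 = (k - 3) + 2 from by omega, pow_add]
      ring
    rw [hfd, hcast]
    congr 1
    apply pvReorder_eq (2 ^ (k - 3))
    rw [PySem.List.slice_from_natCast, List.length_drop, pvIt_length]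
    have e1 : (2 : Nat) ^ (k - 1) * 2 = 2 ^ k := by
      rw [← pow_succ]; congr 1; omega
    have e2 : (2 : Nat) ^ (k - 3) * 4 = 2 ^ (k - 1) := by
      rw [show (4 : Nat) = 2 ^ 2 from rfl, ← pow_add]; congr 1; omega
    omega

-- ===== VERDICT (by name: the statement is the Claim_ definition above) =====
theorem compute_first_round_slots_spec : Claim_equal_compute_first_round_slots := by
  intro n ids _ hpre
  unfold Spec_compute_first_round_slots
  simp only [compute_first_round_slots, compute_first_round_slots_alt]
  rw [hpre.1]
  rw [if_neg (show ¬(n ≠ n) from fun hcon => hcon rfl)]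
  rw [if_neg (show ¬(n ≠ n) from fun hcon => hcon rfl)]
  rw [pvLine_eq n]
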